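-- pv_equiv track=rewrite | github.com/amol-ship-it/agi-core | domains/arc/transformation_primitives.py | gravity_right
-- ===== SOURCE A (Python) =====
-- Grid = list[list[int]]
--
-- def gravity_right(grid: Grid) -> Grid:
--     """Move all non-zero pixels right by gravity (within each row)."""
--     if not grid or not grid[0]:
--         return grid
--     h, w = len(grid), len(grid[0])
--     result = [[0] * w for _ in range(h)]
--     for r in range(h):
--         non_zero = [grid[r][c] for c in range(w) if grid[r][c] != 0]
--         for i, val in enumerate(non_zero):
--             result[r][w - len(non_zero) + i] = val
--     return result
-- ===== SOURCE B (Python) =====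
-- def gravity_right(grid):
--     """Move all non-zero pixels right by gravity (within each row)."""
--     if not grid or not grid[0]:
--         return grid
--     w = len(grid[0])
--     return [sorted(row[:w], key=lambda x: x != 0) for row in grid]
-- ===== Notes on version B (the rewrite author's own statement) =====
-- stated objective: idiomatic
-- what changed: Each output row is produced by one stable sort of the row's first w cells with the boolean key (x != 0) that sends zeros left, replacing A's preallocated zero matrix, per-row nonzero filtering and arithmetic index placement.
import Mathlib
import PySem

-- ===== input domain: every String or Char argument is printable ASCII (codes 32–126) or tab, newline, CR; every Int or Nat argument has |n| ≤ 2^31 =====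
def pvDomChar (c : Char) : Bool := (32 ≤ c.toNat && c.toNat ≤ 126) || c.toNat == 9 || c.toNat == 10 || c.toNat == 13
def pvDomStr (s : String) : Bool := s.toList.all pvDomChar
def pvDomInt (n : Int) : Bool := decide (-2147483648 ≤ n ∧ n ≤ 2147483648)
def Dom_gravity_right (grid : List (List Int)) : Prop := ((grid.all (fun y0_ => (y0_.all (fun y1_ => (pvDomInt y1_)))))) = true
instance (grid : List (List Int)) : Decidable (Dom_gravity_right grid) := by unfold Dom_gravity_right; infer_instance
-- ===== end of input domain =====

-- B replaces A's preallocated zero matrix + per-row filter-and-index-placement by one stable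
-- per-row sort of the first w cells with the boolean key (x != 0), w the first row's width.


-- ===== PORT A =====
def gravity_right (grid : List (List Int)) : List (List Int) :=
  if grid = [] ∨ grid.headD [] = [] then grid
  else
    let h := grid.length
    let w := (grid.headD []).length
    let result := (List.range h).map (fun _ => List.replicate w (0 : Int))
    (List.range h).foldl (fun res r =>
      let row := grid.getD r []
      let nonZero := (List.range w).filterMap (fun (c : Nat) =>
        match PySem.List.pyGet? row (c : Int) with
        | some v => if v ≠ 0 then some v else none
        | none => none)   -- the none branch is where Python raises IndexError (outside Pre_)
      res.set r ((nonZero.zipIdx).foldl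
        (fun rrow p => rrow.set (w - nonZero.length + p.2) p.1) (res.getD r []))) result

-- ===== PORT B =====
def gravity_right_alt (grid : List (List Int)) : List (List Int) :=
  if grid = [] ∨ grid.headD [] = [] then grid
  else
    let w := (grid.headD []).length
    grid.map (fun row =>
      PySem.List.sorted (PySem.List.slice row none (some (w : Int))) (fun x => decide (x ≠ 0)))

-- ===== PRECONDITION & SPEC =====
-- Pre_ excludes exactly the grids on which A raises IndexError: first row nonempty and
-- some row shorter than the first row.
def Pre_gravity_right (grid : List (List Int)) : Prop :=
  ∀ row ∈ grid, (grid.headD []).length ≤ row.length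
instance (grid : List (List Int)) : Decidable (Pre_gravity_right grid) := by
  unfold Pre_gravity_right; infer_instance
def pvWitness_gravity_right : List (List Int) := [[1, 0], [0, 2]]

def Spec_gravity_right (grid : List (List Int)) (out : List (List Int)) : Prop :=
  out = gravity_right_alt grid
instance (grid : List (List Int)) (out : List (List Int)) : Decidable (Spec_gravity_right grid out) := by
  unfold Spec_gravity_right; infer_instance

-- ===== CLAIM (what is proved, stated in full; the proofs are below) =====
def Claim_equal_gravity_right : Prop := ∀ (grid : List (List Int)), Dom_gravity_right grid → Pre_gravity_right grid → Spec_gravity_right grid (gravity_right grid)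

-- ===== LEMMAS AND PROOFS =====

-- B side: a stable sort by the boolean key (x ≠ 0) is the zeros followed by the nonzeros.
theorem pv_ins_mid (before : Int → Int → Bool) (x : Int) (F T : List Int)
    (hF : ∀ y ∈ F, before x y = false) (hT : ∀ y ∈ T, before x y = true) :
    PySem.List.insertBy before x (F ++ T) = F ++ x :: T := by
  induction F with
  | nil =>
    cases T with
    | nil => simp [PySem.List.insertBy]
    | cons t ts => simp [PySem.List.insertBy, hT t (by simp)]
  | cons f F ih =>
    simp only [List.cons_append, PySem.List.insertBy, hF f (by simp)]
    simp only [Bool.false_eq_true, if_false, List.cons.injEq, true_and]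
    exact ih (fun y hy => hF y (by simp [hy]))

theorem pv_fold_part (key : Int → Bool) :
    ∀ (xs F T : List Int), (∀ y ∈ F, key y = false) → (∀ y ∈ T, key y = true) →
    xs.foldl (fun acc x => PySem.List.insertBy (fun a b => decide ((key a) < (key b))) x acc) (F ++ T)
      = (F ++ xs.filter (fun x => key x = false)) ++ (T ++ xs.filter key) := by
  intro xs
  induction xs with
  | nil => intro F T hF hT; simp
  | cons x xs ih =>
    intro F T hF hT
    simp only [List.foldl_cons]
    cases hkx : key x with
    | false =>
      rw [pv_ins_mid _ _ F T (fun y hy => by simp [hkx, hF y hy])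
            (fun y hy => by simp [hkx, hT y hy])]
      have h2 : (F ++ x :: T) = ((F ++ [x]) ++ T) := by simp
      have hF' : ∀ y ∈ F ++ [x], key y = false := by
        intro y hy
        rcases List.mem_append.1 hy with h | h
        · exact hF y h
        · simp at h; simpa [h] using hkx
      rw [h2, ih (F ++ [x]) T hF' hT]
      simp [hkx]
    | true =>
      have hno : ∀ y ∈ F ++ T, (fun a b => decide ((key a) < (key b))) x y = false := by
        intro y hy
        rcases List.mem_append.1 hy with h | h
        · simp [hkx, hF y h]
        · simp [hkx, hT y h]
      rw [PySem.List.insertBy_of_forall_not_before _ _ _ hno]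
      have h2 : ((F ++ T) ++ [x]) = (F ++ (T ++ [x])) := by simp
      have hT' : ∀ y ∈ T ++ [x], key y = true := by
        intro y hy
        rcases List.mem_append.1 hy with h | h
        · exact hT y h
        · simp at h; simpa [h] using hkx
      rw [h2, ih F (T ++ [x]) hF hT']
      simp [hkx]

theorem pv_sorted_part (row : List Int) :
    PySem.List.sorted row (fun x => decide (x ≠ 0))
      = row.filter (fun x => decide (x = 0)) ++ row.filter (fun x => decide (x ≠ 0)) := by
  rw [PySem.List.sorted_eq_foldl_insertBy]
  have h := pv_fold_part (fun x => decide (x ≠ 0)) row [] [] (by simp) (by simp)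
  simp only [List.nil_append] at h
  rw [h]
  congr 1
  apply List.filter_congr
  intro y _
  by_cases hy : y = 0 <;> simp [hy]

theorem pv_filter_zero (l : List Int) :
    l.filter (fun x => decide (x = 0)) = List.replicate (l.countP (fun x => decide (x = 0))) 0 := by
  induction l with
  | nil => simp
  | cons x xs ih =>
    by_cases hx : x = 0
    · subst hx; simp [ih, List.replicate_succ]
    · simp [hx, ih]

-- A side: small list-surgery lemmas …
theorem pv_take_set {α : Type} : ∀ (l : List α) (i : Nat) (a : α), i < l.length →
    (l.set i a).take (i + 1) = l.take i ++ [a] := by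
  intro l
  induction l with
  | nil => intro i a h; simp at h
  | cons x t ih =>
    intro i a h
    cases i with
    | zero => simp
    | succ i =>
      simp only [List.set_cons_succ, List.take_succ_cons, List.cons_append]
      rw [ih i a (by simpa using h)]

theorem pv_drop_set {α : Type} : ∀ (l : List α) (i j : Nat) (a : α), i < j →
    (l.set i a).drop j = l.drop j := by
  intro l
  induction l with
  | nil => intro i j a h; simp
  | cons x t ih =>
    intro i j a h
    cases i with
    | zero =>
      cases j with
      | zero => omega
      | succ j => simp
    | succ i =>
      cases j with
      | zero => omega
      | succ j =>
        simp only [List.set_cons_succ, List.drop_succ_cons]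
        exact ih i j a (by omega)

-- … the inner enumerate-and-place loop writes nz at consecutive positions k+s, …
theorem pv_place : ∀ (nz : List Int) (s k : Nat) (base : List Int),
    k + s + nz.length ≤ base.length →
    ((nz.zipIdx s).foldl (fun b (p : Int × Nat) => b.set (k + p.2) p.1) base)
      = base.take (k + s) ++ nz ++ base.drop (k + s + nz.length) := by
  intro nz
  induction nz with
  | nil => intro s k base h; simp
  | cons a t ih =>
    intro s k base h
    simp only [List.zipIdx_cons, List.foldl_cons]
    rw [ih (s + 1) k (base.set (k + s) a)
          (by rw [List.length_set]; simp only [List.length_cons] at h; omega)]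
    have hks : k + s < base.length := by simp at h; omega
    have h1 : (base.set (k + s) a).take (k + s + 1) = base.take (k + s) ++ [a] :=
      pv_take_set base (k + s) a hks
    have h2 : (base.set (k + s) a).drop (k + s + 1 + t.length) = base.drop (k + s + 1 + t.length) :=
      pv_drop_set base (k + s) (k + s + 1 + t.length) a (by omega)
    have e1 : k + (s + 1) = k + s + 1 := by omega
    have e2 : k + s + 1 + t.length = k + s + (a :: t).length := by simp; omega
    rw [e1, h1, h2, e2]
    simp

theorem pv_set_append {α : Type} : ∀ (M l : List α) (x : α),
    (M ++ l).set M.length x = M ++ l.set 0 x := by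
  intro M
  induction M with
  | nil => intro l x; simp
  | cons m M ih => intro l x; simp [ih]

theorem pv_set_append' {α : Type} (M l : List α) (x : α) (n : Nat) (h : M.length = n) :
    (M ++ l).set n x = M ++ l.set 0 x := by
  rw [← h]; exact pv_set_append M l x

-- … the outer row-by-row fold only touches row r at step r.
theorem pv_foldl_set_range {α : Type} (g : Nat → α → α) (d : α) :
    ∀ (n : Nat) (res : List α), n ≤ res.length →
    (List.range n).foldl (fun a r => a.set r (g r (a.getD r d))) res
      = (List.range n).map (fun r => g r (res.getD r d)) ++ res.drop n := by
  intro n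
  induction n with
  | zero => intro res h; simp
  | succ n ih =>
    intro res h
    rw [List.range_succ, List.foldl_append, List.map_append, ih res (by omega)]
    have hn : n < res.length := by omega
    have hdrop : res.drop n = res[n] :: res.drop (n + 1) := List.drop_eq_getElem_cons hn
    have hlenM : ((List.range n).map (fun r => g r (res.getD r d))).length = n := by simp
    have hget : (((List.range n).map (fun r => g r (res.getD r d))) ++ res.drop n).getD n d
        = res.getD n d := by
      rw [hdrop]
      rw [List.getD, List.getElem?_append_right (by omega)]
      simp [List.getD, List.getElem?_eq_getElem hn]
    simp only [List.foldl_cons, List.foldl_nil]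
    rw [hget, pv_set_append' _ _ _ _ hlenM, hdrop]
    rw [List.set_cons_zero]
    simp

-- … the non-zero scan over range w on a row of length ≥ w is a filter of the first w cells.
theorem pv_nonzero_eq : ∀ (w : Nat) (row : List Int), w ≤ row.length →
    (List.range w).filterMap (fun (c : Nat) =>
        match PySem.List.pyGet? row (c : Int) with
        | some v => if v ≠ 0 then some v else none
        | none => none)
      = (row.take w).filter (fun x => decide (x ≠ 0)) := by
  intro w
  induction w with
  | zero => intro row h; simp
  | succ w ih =>
    intro row h
    rw [List.range_succ, List.filterMap_append, ih row (by omega)]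
    have hw : w < row.length := by omega
    have hget : PySem.List.pyGet? row ((w : Nat) : Int) = some row[w] := by
      rw [PySem.List.pyGet?_natCast, List.getElem?_eq_getElem hw]
    rw [List.take_add_one, List.getElem?_eq_getElem hw]
    simp only [List.filterMap_cons, List.filterMap_nil, hget, Option.toList_some,
      List.filter_append, List.filter_cons, List.filter_nil]
    by_cases hz : row[w] = 0 <;> simp [hz]

-- A's result, characterised row by row (needs only Pre_: every row at least w wide).
def pvRowPlaced (w : Nat) (row : List Int) : List Int :=
  (List.replicate (w - ((row.take w).filter (fun x => decide (x ≠ 0))).length) (0 : Int))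
    ++ (row.take w).filter (fun x => decide (x ≠ 0))

theorem pv_A_eq (grid : List (List Int))
    (hpre : ∀ row ∈ grid, (grid.headD []).length ≤ row.length)
    (hg : ¬(grid = [] ∨ grid.headD [] = [])) :
    gravity_right grid = grid.map (pvRowPlaced (grid.headD []).length) := by
  unfold gravity_right
  rw [if_neg hg]
  set w := (grid.headD []).length with hw
  set h := grid.length with hh
  have hres : (List.range h).map (fun _ => List.replicate w (0 : Int))
      = List.replicate h (List.replicate w (0 : Int)) := by
    simp [List.map_const']
  simp only [hres]
  rw [pv_foldl_set_range (fun r v =>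
        ((((List.range w).filterMap (fun (c : Nat) =>
            match PySem.List.pyGet? (grid.getD r []) (c : Int) with
            | some v => if v ≠ 0 then some v else none
            | none => none))).zipIdx).foldl
          (fun rrow p => rrow.set (w - (((List.range w).filterMap (fun (c : Nat) =>
            match PySem.List.pyGet? (grid.getD r []) (c : Int) with
            | some v => if v ≠ 0 then some v else none
            | none => none))).length + p.2) p.1) v) [] h
        (List.replicate h (List.replicate w (0:Int))) (by simp)]
  rw [List.drop_eq_nil_of_le (by simp), List.append_nil]
  apply List.ext_getElem (by simp [hh])
  intro i hi1 hi2
  simp only [List.getElem_map, List.getElem_range]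
  have hih : i < h := by simpa using hi1
  have hrow : grid.getD i [] = grid[i]'(by omega) := by
    simp [List.getD, List.getElem?_eq_getElem (show i < grid.length by omega)]
  have hbase : (List.replicate h (List.replicate w (0:Int))).getD i []
      = List.replicate w (0 : Int) := by
    simp [List.getD, List.getElem?_eq_getElem
      (show i < (List.replicate h (List.replicate w (0:Int))).length by simp [hih])]
  rw [hrow, hbase]
  have hwle : w ≤ (grid[i]'(by omega)).length := hpre _ (List.getElem_mem _)
  rw [pv_nonzero_eq w _ hwle]
  set nz := ((grid[i]'(by omega)).take w).filter (fun x => decide (x ≠ 0)) with hnz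
  have hnzlen : nz.length ≤ w := by
    calc nz.length ≤ ((grid[i]'(by omega)).take w).length := List.length_filter_le _ _
    _ ≤ w := by simp
  rw [pv_place nz 0 (w - nz.length) (List.replicate w (0:Int)) (by simp; omega)]
  simp only [Nat.add_zero]
  rw [List.take_replicate, List.drop_replicate]
  have e1 : min (w - nz.length) w = w - nz.length := by omega
  have e2 : w - (w - nz.length + nz.length) = 0 := by omega
  rw [e1, e2]
  simp only [pvRowPlaced, List.append_nil, List.replicate_zero]
  rw [← hnz]

-- per-row agreement when the row is exactly w wide
theorem pv_row_eq (w : Nat) (row : List Int) (hlen : row.length = w) :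
    pvRowPlaced w row = PySem.List.sorted row (fun x => decide (x ≠ 0)) := by
  rw [pv_sorted_part]
  unfold pvRowPlaced
  rw [List.take_of_length_le (by omega)]
  congr 1
  rw [pv_filter_zero]
  congr 1
  have h1 : row.countP (fun x => decide (x = 0)) + row.countP (fun x => decide (x ≠ 0))
      = row.length := by
    have := List.length_eq_countP_add_countP (l := row) (p := fun x => decide (x = 0))
    rw [this]
    congr 1
    apply List.countP_congr
    intro y _
    by_cases hy : y = 0 <;> simp [hy]
  have h2 : row.countP (fun x => decide (x ≠ 0))
      = (row.filter (fun x => decide (x ≠ 0))).length :=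
    List.countP_eq_length_filter
  omega

-- ===== VERDICT (by name: the statement is the Claim_ definition above) =====
theorem gravity_right_spec : Claim_equal_gravity_right := by
  intro grid _ hpre
  by_cases hg : grid = [] ∨ grid.headD [] = []
  · unfold Spec_gravity_right gravity_right gravity_right_alt
    rw [if_pos hg, if_pos hg]
  · unfold Spec_gravity_right
    rw [pv_A_eq grid hpre hg]
    unfold gravity_right_alt
    rw [if_neg hg]
    apply List.map_congr_left
    intro row hmem
    rw [PySem.List.slice_to_natCast]
    have hle : (grid.headD []).length ≤ row.length := hpre row hmem
    have h1 : pvRowPlaced (grid.headD []).length row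
        = pvRowPlaced (grid.headD []).length (row.take (grid.headD []).length) := by
      unfold pvRowPlaced
      rw [List.take_take, Nat.min_self]
    rw [h1]
    exact pv_row_eq _ _ (by rw [List.length_take]; omega)
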